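-- pv_equiv track=rewrite | github.com/SpookySec/AirlineApp | flights/roster_engine.py | _generate_seat_labels
-- ===== SOURCE A (Python) =====
-- from typing import Dict, List, Tuple
--
-- def _generate_seat_labels(prefix: str, count: int, start_row: int = 1, seats_per_row: int = 6) -> List[str]:
--     letters = list("ABCDEF")
--     seats: List[str] = []
--     row = start_row
--     remaining = count
--     while remaining > 0:
--         for letter in letters[:seats_per_row]:
--             if remaining <= 0:
--                 break
--             seats.append(f"{row}{letter}")
--             remaining -= 1
--         row += 1
--     return seats
-- ===== SOURCE B (Python) =====
-- from typing import List
--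
-- def _generate_seat_labels(prefix: str, count: int, start_row: int = 1, seats_per_row: int = 6) -> List[str]:
--     letters = "ABCDEF"[:seats_per_row]
--     n = len(letters)
--     if n == 0:
--         return []
--     return [f"{start_row + i // n}{letters[i % n]}" for i in range(count)]
-- ===== Notes on version B (the rewrite author's own statement) =====
-- stated objective: simpler
-- what changed: Replaced A's nested while/for counter machinery (mutable row/remaining with break) by closed-form divmod indexing: one flat pass over range(count) computing row = start_row + i//per_row and letter = letters[i%per_row].
import Mathlib
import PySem

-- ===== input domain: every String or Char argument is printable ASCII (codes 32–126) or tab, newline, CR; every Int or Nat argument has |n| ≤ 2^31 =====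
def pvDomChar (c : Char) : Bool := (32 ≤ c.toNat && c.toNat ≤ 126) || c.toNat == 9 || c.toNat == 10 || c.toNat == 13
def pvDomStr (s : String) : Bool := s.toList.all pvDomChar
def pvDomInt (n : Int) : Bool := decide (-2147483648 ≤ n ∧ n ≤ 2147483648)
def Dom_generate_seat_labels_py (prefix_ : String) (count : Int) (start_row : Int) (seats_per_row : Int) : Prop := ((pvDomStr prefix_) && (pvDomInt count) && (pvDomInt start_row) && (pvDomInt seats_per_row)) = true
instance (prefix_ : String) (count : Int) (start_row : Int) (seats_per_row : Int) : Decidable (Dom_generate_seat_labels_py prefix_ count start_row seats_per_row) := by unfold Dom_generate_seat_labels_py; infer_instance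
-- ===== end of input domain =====

-- B replaces A's nested while/for counter loop by a single flat pass with divmod indexing (objective: simpler).

-- ===== PORT A =====
-- inner `for letter in letters[:seats_per_row]` with the `if remaining <= 0: break`
def pvInnerA (row : Int) (letters : List Char) (seats : List String) (remaining : Int) : List String × Int :=
  match letters with
  | [] => (seats, remaining)
  | l :: ls =>
    if remaining ≤ 0 then (seats, remaining)
    else pvInnerA row ls (seats ++ [PySem.Int.toStr row ++ String.mk [l]]) (remaining - 1)

-- outer `while remaining > 0`; fuel bounds the number of outer iterations (count.toNat + 1 suffices
-- whenever the truncated letter list is nonempty or count ≤ 0; elsewhere Python A loops forever — outside Pre_)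
def pvOuterA (fuel : Nat) (letters : List Char) (row : Int) (seats : List String) (remaining : Int) : List String :=
  match fuel with
  | 0 => seats
  | fuel + 1 =>
    if remaining > 0 then
      let p := pvInnerA row letters seats remaining
      pvOuterA fuel letters (row + 1) p.1 p.2
    else seats

def generate_seat_labels_py (prefix_ : String) (count : Int) (start_row : Int) (seats_per_row : Int) : List String :=
  pvOuterA (count.toNat + 1) (PySem.List.slice ['A','B','C','D','E','F'] none (some seats_per_row)) start_row [] count

-- ===== PORT B =====
def generate_seat_labels_py_alt (prefix_ : String) (count : Int) (start_row : Int) (seats_per_row : Int) : List String :=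
  let letters := PySem.List.slice ['A','B','C','D','E','F'] none (some seats_per_row)
  let n : Int := letters.length
  if letters.length = 0 then []
  else (PySem.List.pyRange 0 count 1).map (fun i =>
    PySem.Int.toStr (start_row + PySem.Int.floordiv i n) ++ String.mk [PySem.List.pyGetD letters (PySem.Int.mod i n) 'A'])

-- ===== PRECONDITION & SPEC =====
-- Pre_ excludes exactly the inputs on which A never returns: count > 0 with an empty truncated
-- letter list (seats_per_row = 0 or seats_per_row ≤ -6), where A's while loop runs forever.
def Pre_generate_seat_labels_py (prefix_ : String) (count : Int) (start_row : Int) (seats_per_row : Int) : Prop :=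
  count ≤ 0 ∨ (-5 ≤ seats_per_row ∧ seats_per_row ≠ 0)
instance (prefix_ : String) (count : Int) (start_row : Int) (seats_per_row : Int) : Decidable (Pre_generate_seat_labels_py prefix_ count start_row seats_per_row) := by unfold Pre_generate_seat_labels_py; infer_instance

def pvWitness_generate_seat_labels_py : String × Int × Int × Int := ("X", 7, 1, 6)

def Spec_generate_seat_labels_py (prefix_ : String) (count : Int) (start_row : Int) (seats_per_row : Int) (out : List String) : Prop := out = generate_seat_labels_py_alt prefix_ count start_row seats_per_row
instance (prefix_ : String) (count : Int) (start_row : Int) (seats_per_row : Int) (out : List String) : Decidable (Spec_generate_seat_labels_py prefix_ count start_row seats_per_row out) := by unfold Spec_generate_seat_labels_py; infer_instance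

-- ===== CLAIM (what is proved, stated in full; the proofs are below) =====
def Claim_equal_generate_seat_labels_py : Prop := ∀ (prefix_ : String) (count : Int) (start_row : Int) (seats_per_row : Int), Dom_generate_seat_labels_py prefix_ count start_row seats_per_row → Pre_generate_seat_labels_py prefix_ count start_row seats_per_row → Spec_generate_seat_labels_py prefix_ count start_row seats_per_row (generate_seat_labels_py prefix_ count start_row seats_per_row)

-- ===== LEMMAS AND PROOFS =====

-- the per-seat label of B, with the index split into row offset and letter position
def pvLabel (L : List Char) (row : Int) (i : Nat) : String :=
  PySem.Int.toStr (row + ((i / L.length : Nat) : Int)) ++ String.mk [L.getD (i % L.length) 'A']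

lemma pvInnerA_spec (row : Int) : ∀ (L : List Char) (acc : List String) (r : Int), 0 ≤ r →
    pvInnerA row L acc r =
      (acc ++ (L.take r.toNat).map (fun c => PySem.Int.toStr row ++ String.mk [c]),
       r - (min L.length r.toNat : Nat)) := by
  intro L
  induction L with
  | nil => intro acc r hr; simp [pvInnerA]
  | cons l ls ih =>
    intro acc r hr
    by_cases h : r ≤ 0
    · have : r = 0 := le_antisymm h hr
      subst this; simp [pvInnerA]
    · have hstep := ih (acc ++ [PySem.Int.toStr row ++ String.mk [l]]) (r - 1) (by omega)
      have htn : r.toNat = (r - 1).toNat + 1 := by omega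
      simp only [pvInnerA, if_neg h, hstep, Prod.mk.injEq]
      refine ⟨?_, ?_⟩
      · rw [htn]; simp [List.take_succ_cons]
      · have hmin : (min (ls.length + 1) r.toNat : Nat) = (min ls.length (r - 1).toNat : Nat) + 1 := by omega
        simp only [List.length_cons, hmin]
        push_cast; ring

-- pure index fact: one full-or-partial row peeled off the front of the flat range
lemma pvRange_split (L : List Char) (hL : 1 ≤ L.length) (row : Int) (k : Nat) :
    (List.range k).map (pvLabel L row) =
      (L.take k).map (fun c => PySem.Int.toStr row ++ String.mk [c]) ++
      (List.range (k - min L.length k)).map (pvLabel L (row + 1)) := by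
  by_cases hk : k ≤ L.length
  · have hmk : min L.length k = k := by omega
    rw [hmk]
    simp only [Nat.sub_self, List.range_zero, List.map_nil, List.append_nil]
    apply List.ext_getElem
    · simp; omega
    · intro i h1 h2
      simp only [List.getElem_map, List.getElem_range, List.getElem_take]
      have hi : i < k := by simpa using h1
      unfold pvLabel
      rw [Nat.div_eq_of_lt (by omega), Nat.mod_eq_of_lt (by omega)]
      rw [List.getD_eq_getElem L 'A' (by omega)]
      norm_num
  · have hmin : min L.length k = L.length := by omega
    rw [hmin]
    have hsplit : List.range k = List.range L.length ++ (List.range (k - L.length)).map (L.length + ·) := by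
      rw [← List.range_add]
      congr 1; omega
    rw [hsplit, List.map_append, List.map_map]
    congr 1
    · have hLk : L.take k = L := List.take_of_length_le (by omega)
      rw [hLk]
      apply List.ext_getElem
      · simp
      · intro i h1 h2
        simp only [List.length_map, List.length_range] at h1 h2
        simp only [List.getElem_map, List.getElem_range]
        unfold pvLabel
        rw [Nat.div_eq_of_lt (by omega), Nat.mod_eq_of_lt (by omega)]
        rw [List.getD_eq_getElem L 'A' (by omega)]
        norm_num
    · apply List.map_congr_left
      intro i _
      simp only [Function.comp_apply]
      unfold pvLabel
      have hd : (L.length + i) / L.length = i / L.length + 1 := by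
        rw [Nat.add_comm]; exact Nat.add_div_right i (by omega)
      have hm : (L.length + i) % L.length = i % L.length := by
        rw [Nat.add_comm, Nat.add_mod_right]
      rw [hd, hm]
      congr 1
      push_cast; ring_nf

lemma pvOuterA_spec (L : List Char) (hL : 1 ≤ L.length) :
    ∀ (fuel : Nat) (r : Int) (row : Int) (acc : List String), 0 ≤ r → r.toNat ≤ fuel →
      pvOuterA fuel L row acc r = acc ++ (List.range r.toNat).map (pvLabel L row) := by
  intro fuel
  induction fuel with
  | zero =>
    intro r row acc hr hf
    have : r = 0 := by omega
    subst this; simp [pvOuterA]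
  | succ fuel ih =>
    intro r row acc hr hf
    by_cases h : r > 0
    · simp only [pvOuterA, if_pos h]
      rw [pvInnerA_spec row L acc r hr]
      have hr' : (0:Int) ≤ r - (min L.length r.toNat : Nat) := by omega
      have hft : (r - (min L.length r.toNat : Nat)).toNat ≤ fuel := by omega
      rw [ih _ _ _ hr' hft]
      have htn : (r - (min L.length r.toNat : Nat)).toNat = r.toNat - min L.length r.toNat := by omega
      rw [htn, List.append_assoc, ← pvRange_split L hL row r.toNat]
    · have h0 : r.toNat = 0 := by omega
      simp [pvOuterA, h, h0]

-- B's map rewritten over List.range with pvLabel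
lemma alt_eq (prefix_ : String) (count start_row seats_per_row : Int)
    (hL : (PySem.List.slice ['A','B','C','D','E','F'] none (some seats_per_row)).length ≠ 0) :
    generate_seat_labels_py_alt prefix_ count start_row seats_per_row =
      (List.range count.toNat).map (pvLabel (PySem.List.slice ['A','B','C','D','E','F'] none (some seats_per_row)) start_row) := by
  set L := PySem.List.slice ['A','B','C','D','E','F'] none (some seats_per_row) with hLdef
  unfold generate_seat_labels_py_alt
  rw [← hLdef]
  simp only [if_neg hL]
  by_cases hc : 0 ≤ count
  · have hcc : count = (count.toNat : Int) := by omega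
    rw [hcc, PySem.List.pyRange_zero_natCast, List.map_map]
    apply List.map_congr_left
    intro i _
    simp only [Function.comp_apply, PySem.Int.floordiv_natCast, PySem.Int.mod_natCast,
      PySem.List.pyGetD_natCast, pvLabel]
  · have h0 : count.toNat = 0 := by omega
    have hnil : PySem.List.pyRange 0 count 1 = [] := by
      cases hEmpty : PySem.List.pyRange 0 count 1 with
      | nil => rfl
      | cons x xs =>
        exfalso
        have hx : x ∈ PySem.List.pyRange 0 count 1 := by rw [hEmpty]; exact List.mem_cons_self
        rw [PySem.List.mem_pyRange_one] at hx
        omega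
    rw [hnil, h0]; simp

-- truncated letter list is nonempty inside Pre_ when count > 0
lemma letters_nonempty (seats_per_row : Int) (h1 : -5 ≤ seats_per_row) (h2 : seats_per_row ≠ 0) :
    (PySem.List.slice ['A','B','C','D','E','F'] none (some seats_per_row)).length ≠ 0 := by
  by_cases hs : 0 ≤ seats_per_row
  · rw [PySem.List.slice_to _ hs]
    simp only [List.length_take, List.length_cons, List.length_nil]
    omega
  · have h5 : seats_per_row = -1 ∨ seats_per_row = -2 ∨ seats_per_row = -3 ∨
      seats_per_row = -4 ∨ seats_per_row = -5 := by omega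
    rcases h5 with h|h|h|h|h <;> subst h <;> decide

-- ===== VERDICT (by name: the statement is the Claim_ definition above) =====
theorem generate_seat_labels_py_spec : Claim_equal_generate_seat_labels_py := by
  intro prefix_ count start_row seats_per_row _ hpre
  unfold Spec_generate_seat_labels_py generate_seat_labels_py
  set L := PySem.List.slice ['A','B','C','D','E','F'] none (some seats_per_row) with hLdef
  by_cases hLe : L.length = 0
  · -- empty truncated letter list: Pre_ forces count ≤ 0, both sides are []
    have hc : count ≤ 0 := by
      rcases hpre with h | ⟨h1, h2⟩
      · exact h
      · exact absurd hLe (hLdef ▸ letters_nonempty seats_per_row h1 h2)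
    have h0 : count.toNat = 0 := by omega
    unfold generate_seat_labels_py_alt
    rw [← hLdef]
    simp only [if_pos hLe, h0]
    simp [pvOuterA, show ¬ count > 0 by omega]
  · rw [alt_eq prefix_ count start_row seats_per_row (hLdef ▸ hLe), ← hLdef]
    by_cases hc : 0 ≤ count
    · rw [pvOuterA_spec L (by omega) (count.toNat + 1) count start_row [] hc (by omega)]
      simp
    · have h0 : count.toNat = 0 := by omega
      rw [h0]
      simp [pvOuterA, show ¬ count > 0 by omega]
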